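-- pv_equiv track=rewrite | github.com/Suryansh282/Elyx | task1/src/textstyle.py | _merge_short_lines
-- ===== SOURCE A (Python) =====
-- from typing import Iterable, List
--
-- def _merge_short_lines(parts: List[str]) -> List[str]:
--     """Join very short fragments so the chat doesn’t feel bullet-y."""
--     out: List[str] = []
--     buf: List[str] = []
--     for p in parts:
--         if len(p) < 28:
--             buf.append(p)
--         else:
--             if buf:
--                 out.append(" ".join(buf))
--                 buf = []
--             out.append(p)
--     if buf:
--         out.append(" ".join(buf))
--     return out
-- ===== SOURCE B (Python) =====
-- from typing import List
--
-- def _merge_short_lines(parts: List[str]) -> List[str]: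
--     """Join very short fragments so the chat doesn't feel bullet-y.
--
--     Run-segmentation rewrite: scan maximal runs of short fragments with an
--     index, join each run in one step; no buffer variable, no post-loop flush.
--     """
--     out: List[str] = []
--     i, n = 0, len(parts)
--     while i < n:
--         if len(parts[i]) < 28:
--             j = i + 1
--             while j < n and len(parts[j]) < 28:
--                 j += 1
--             out.append(" ".join(parts[i:j]))
--             i = j
--         else:
--             out.append(parts[i])
--             i += 1
--     return out
-- ===== Notes on version B (the rewrite author's own statement) =====
-- stated objective: alternative
-- what changed: Replaced the per-element buffer-and-flush accumulation with run segmentation: an index scan finds each maximal run of short fragments and joins it in one step, so there is no buf state and no post-loop flush.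
import Mathlib
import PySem

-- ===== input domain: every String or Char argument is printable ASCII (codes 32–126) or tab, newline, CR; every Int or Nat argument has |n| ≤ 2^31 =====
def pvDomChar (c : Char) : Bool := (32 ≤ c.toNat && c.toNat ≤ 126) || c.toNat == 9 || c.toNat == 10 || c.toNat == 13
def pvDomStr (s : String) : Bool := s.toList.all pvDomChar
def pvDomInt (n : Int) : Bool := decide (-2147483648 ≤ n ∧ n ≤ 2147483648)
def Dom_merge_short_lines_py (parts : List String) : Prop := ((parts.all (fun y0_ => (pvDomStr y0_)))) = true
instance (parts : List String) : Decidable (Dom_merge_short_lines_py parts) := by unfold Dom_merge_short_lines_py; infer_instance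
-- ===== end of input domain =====

-- B replaces A's buffer-and-flush loop with run segmentation (each maximal run of
-- short fragments is located and joined in one step); alternative decomposition, same cost.


-- ===== PORT A =====
-- one loop step: append short p to buf, else flush buf (if nonempty) and emit p
def pvStepA (st : List String × List String) (p : String) : List String × List String :=
  if PySem.Str.len p < 28 then (st.1, st.2 ++ [p])
  else if st.2 ≠ [] then (st.1 ++ [PySem.Str.join " " st.2, p], [])
  else (st.1 ++ [p], st.2)

def merge_short_lines_py (parts : List String) : List String :=
  let st := parts.foldl pvStepA ([], [])
  if st.2 ≠ [] then st.1 ++ [PySem.Str.join " " st.2] else st.1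

-- ===== PORT B =====
-- run segmentation: a short head starts a maximal short run (the inner while loop = takeWhile),
-- joined in one step; a long head is emitted as-is
def merge_short_lines_py_alt (parts : List String) : List String :=
  match parts with
  | [] => []
  | p :: rest =>
    if PySem.Str.len p < 28 then
      PySem.Str.join " " (p :: rest.takeWhile (fun s => decide (PySem.Str.len s < 28))) ::
        merge_short_lines_py_alt (rest.dropWhile (fun s => decide (PySem.Str.len s < 28)))
    else p :: merge_short_lines_py_alt rest
termination_by parts.length
decreasing_by
  · exact Nat.lt_succ_of_le (List.length_dropWhile_le _ _)
  · simp

-- ===== PRECONDITION & SPEC =====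
def Spec_merge_short_lines_py (parts : List String) (out : List String) : Prop := out = merge_short_lines_py_alt parts
instance (parts : List String) (out : List String) : Decidable (Spec_merge_short_lines_py parts out) := by unfold Spec_merge_short_lines_py; infer_instance

-- ===== CLAIM (what is proved, stated in full; the proofs are below) =====
def Claim_equal_merge_short_lines_py : Prop := ∀ (parts : List String), Dom_merge_short_lines_py parts → Spec_merge_short_lines_py parts (merge_short_lines_py parts)

-- ===== LEMMAS AND PROOFS =====

-- proof-side: flush a pending buffer
def pvFlush (buf : List String) : List String :=
  if buf ≠ [] then [PySem.Str.join " " buf] else []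

-- proof-side: A's remaining output given a pending buffer
def pvS (buf : List String) (parts : List String) : List String :=
  match parts with
  | [] => pvFlush buf
  | p :: rest =>
    if PySem.Str.len p < 28 then pvS (buf ++ [p]) rest
    else pvFlush buf ++ p :: pvS [] rest

theorem pvS_foldA (parts : List String) : ∀ (out buf : List String),
    (let st := parts.foldl pvStepA (out, buf)
     if st.2 ≠ [] then st.1 ++ [PySem.Str.join " " st.2] else st.1) = out ++ pvS buf parts := by
  induction parts with
  | nil =>
    intro out buf
    simp only [List.foldl_nil, pvS, pvFlush]
    split_ifs <;> simp
  | cons p rest ih =>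
    intro out buf
    simp only [List.foldl_cons, pvS]
    by_cases h : PySem.Str.len p < 28
    · simp only [pvStepA, if_pos h]
      exact ih out (buf ++ [p])
    · by_cases hb : buf ≠ []
      · simp only [pvStepA, if_neg h, if_pos hb]
        rw [ih]
        simp [pvFlush, hb]
      · simp only [pvStepA, if_neg h, if_neg hb]
        rw [ih]
        simp at hb
        simp [pvFlush, hb]

theorem alt_nil : merge_short_lines_py_alt [] = [] := by
  rw [merge_short_lines_py_alt.eq_def]

theorem alt_cons (p : String) (rest : List String) :
    merge_short_lines_py_alt (p :: rest) =
      if PySem.Str.len p < 28 then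
        PySem.Str.join " " (p :: rest.takeWhile (fun s => decide (PySem.Str.len s < 28))) ::
          merge_short_lines_py_alt (rest.dropWhile (fun s => decide (PySem.Str.len s < 28)))
      else p :: merge_short_lines_py_alt rest := by
  rw [merge_short_lines_py_alt.eq_def]

theorem pvS_alt (parts : List String) :
    (∀ buf : List String, buf ≠ [] →
      pvS buf parts = PySem.Str.join " " (buf ++ parts.takeWhile (fun s => decide (PySem.Str.len s < 28))) ::
        merge_short_lines_py_alt (parts.dropWhile (fun s => decide (PySem.Str.len s < 28))))
    ∧ pvS [] parts = merge_short_lines_py_alt parts := by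
  induction parts with
  | nil =>
    constructor
    · intro buf hb
      simp [pvS, pvFlush, hb, alt_nil]
    · simp [pvS, pvFlush, alt_nil]
  | cons p rest ih =>
    obtain ⟨ih1, ih2⟩ := ih
    by_cases h : PySem.Str.len p < 28
    · constructor
      · intro buf hb
        simp only [pvS, if_pos h]
        rw [ih1 (buf ++ [p]) (by simp), List.takeWhile_cons_of_pos (by simpa using h),
          List.dropWhile_cons_of_pos (by simpa using h)]
        simp only [List.append_assoc, List.singleton_append]
      · simp only [pvS, if_pos h]
        rw [ih1 ([] ++ [p]) (by simp), alt_cons, if_pos h]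
        simp
    · constructor
      · intro buf hb
        simp only [pvS, if_neg h]
        rw [ih2, List.takeWhile_cons_of_neg (by simpa using h),
          List.dropWhile_cons_of_neg (by simpa using h), alt_cons, if_neg h]
        simp [pvFlush, hb]
      · simp only [pvS, if_neg h, pvFlush]
        rw [ih2, alt_cons, if_neg h]
        simp

-- ===== VERDICT (by name: the statement is the Claim_ definition above) =====
theorem merge_short_lines_py_spec : Claim_equal_merge_short_lines_py := by
  intro parts _
  unfold Spec_merge_short_lines_py merge_short_lines_py
  rw [pvS_foldA parts [] []]
  simpa using (pvS_alt parts).2
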